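-- pv_equiv track=rewrite | github.com/ebragas/recruitcrm-mcp | docs/api-reference/_work/tidy.py | collapse_blank_lines_in_fences
-- ===== SOURCE A (Python) =====
-- def collapse_blank_lines_in_fences(text: str) -> str:
--     """Drop ALL blank lines inside fenced code blocks. The scraped pages
--     interleave blank lines between each source line (artifact of Stoplight's
--     line-by-line renderer)."""
--     out = []
--     in_fence = False
--     for line in text.splitlines():
--         stripped = line.strip()
--         if stripped.startswith("```"):
--             in_fence = not in_fence
--             out.append(line)
--             continue
--         if in_fence and stripped == "":
--             continue
--         out.append(line)
--     return "\n".join(out)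
-- ===== SOURCE B (Python) =====
-- def collapse_blank_lines_in_fences(text: str) -> str:
--     """Drop ALL blank lines inside fenced code blocks (two-pass version:
--     build a prefix-count of fence markers, then filter)."""
--     lines = text.splitlines()
--     marks = [line.strip().startswith("```") for line in lines]
--     depth = []
--     d = 0
--     for m in marks:
--         depth.append(d)
--         d += m
--     keep = [ln for ln, d in zip(lines, depth)
--             if not (d % 2 == 1 and ln.strip() == "")]
--     return "\n".join(keep)
-- ===== Notes on version B (the rewrite author's own statement) =====
-- stated objective: alternative
-- what changed: Replaced the interleaved toggle loop (stateful in_fence flag flipped while emitting) by a two-pass decomposition: first compute per-line fence-marker flags and a prefix count of markers, then filter lines by the parity of markers before them.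
import Mathlib
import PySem

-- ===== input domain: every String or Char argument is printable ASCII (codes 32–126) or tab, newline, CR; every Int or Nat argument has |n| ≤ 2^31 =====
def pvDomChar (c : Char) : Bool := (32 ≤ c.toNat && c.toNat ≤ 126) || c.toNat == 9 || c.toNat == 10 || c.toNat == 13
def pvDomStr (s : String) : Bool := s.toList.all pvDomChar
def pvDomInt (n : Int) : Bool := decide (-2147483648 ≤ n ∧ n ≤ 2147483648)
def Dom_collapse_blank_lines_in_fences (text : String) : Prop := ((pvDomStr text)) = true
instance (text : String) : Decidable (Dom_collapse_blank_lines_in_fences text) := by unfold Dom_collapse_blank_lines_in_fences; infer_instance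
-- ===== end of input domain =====

-- B replaces A's interleaved toggle loop by a two-pass mask-then-filter decomposition (same cost).
-- ===== PORT A =====
def collapse_blank_lines_in_fences (text : String) : String :=
  let r := (PySem.Str.splitlines text).foldl
    (fun (st : List String × Bool) line =>
      let stripped := PySem.Str.strip line
      if PySem.Str.startswith stripped "```" then (st.1 ++ [line], !st.2)
      else if st.2 && stripped == "" then st
      else (st.1 ++ [line], st.2))
    ([], false)
  PySem.Str.join "\n" r.1

-- ===== PORT B =====
-- the `depth` loop of Source B: prefix counts of fence markers, one entry per line
def pvPrefixDepths : List Bool → Nat → List Nat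
  | [], _ => []
  | m :: ms, d => d :: pvPrefixDepths ms (d + (if m then 1 else 0))

def collapse_blank_lines_in_fences_alt (text : String) : String :=
  let lines := PySem.Str.splitlines text
  let marks := lines.map (fun line => PySem.Str.startswith (PySem.Str.strip line) "```")
  let depth := pvPrefixDepths marks 0
  let keep := ((lines.zip depth).filter
    (fun p => !(p.2 % 2 == 1 && PySem.Str.strip p.1 == ""))).map (·.1)
  PySem.Str.join "\n" keep

-- ===== PRECONDITION & SPEC =====
def Spec_collapse_blank_lines_in_fences (text : String) (out : String) : Prop := out = collapse_blank_lines_in_fences_alt text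
instance (text : String) (out : String) : Decidable (Spec_collapse_blank_lines_in_fences text out) := by unfold Spec_collapse_blank_lines_in_fences; infer_instance

-- ===== CLAIM (what is proved, stated in full; the proofs are below) =====
def Claim_equal_collapse_blank_lines_in_fences : Prop := ∀ (text : String), Dom_collapse_blank_lines_in_fences text → Spec_collapse_blank_lines_in_fences text (collapse_blank_lines_in_fences text)

-- ===== LEMMAS AND PROOFS =====

-- a line whose strip starts with ``` does not strip to empty
lemma pv_mark_not_blank (line : String) (h : PySem.Str.startswith (PySem.Str.strip line) "```" = true) :
    (PySem.Str.strip line == "") = false := by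
  simp only [PySem.Str.startswith_eq] at h
  rw [PySem.Chars.startswith_iff] at h
  rcases h with ⟨t, ht⟩
  by_contra hc
  simp only [Bool.not_eq_false, beq_iff_eq] at hc
  have : (PySem.Str.strip line).toList = [] := by rw [hc]; rfl
  rw [this] at ht
  simp at ht

-- the loop of A, with fence flag = parity of markers before, equals B's filter
lemma pv_main (lines : List String) (acc : List String) (d : Nat) :
    (lines.foldl
      (fun (st : List String × Bool) line =>
        let stripped := PySem.Str.strip line
        if PySem.Str.startswith stripped "```" then (st.1 ++ [line], !st.2)
        else if st.2 && stripped == "" then st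
        else (st.1 ++ [line], st.2))
      (acc, decide (d % 2 = 1))).1
    = acc ++ ((lines.zip (pvPrefixDepths
        (lines.map (fun line => PySem.Str.startswith (PySem.Str.strip line) "```")) d)).filter
        (fun p => !(p.2 % 2 == 1 && PySem.Str.strip p.1 == ""))).map (·.1) := by
  induction lines generalizing acc d with
  | nil => simp [pvPrefixDepths]
  | cons ln ls ih =>
    simp only [List.map_cons, pvPrefixDepths, List.zip_cons_cons, List.foldl_cons]
    by_cases hm : PySem.Str.startswith (PySem.Str.strip ln) "```" = true
    · have hb := pv_mark_not_blank ln hm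
      have hpar : (!decide (d % 2 = 1)) = decide ((d + 1) % 2 = 1) := by
        rcases Nat.mod_two_eq_zero_or_one d with h | h <;> simp [Nat.add_mod, h]
      rw [hm, if_pos rfl, hpar, ih]
      simp [List.filter_cons, hb]
    · have hm' : PySem.Str.startswith (PySem.Str.strip ln) "```" = false := by
        simpa using hm
      rw [hm', if_neg (by simp)]
      by_cases hsk : (decide (d % 2 = 1) && (PySem.Str.strip ln == "")) = true
      · rw [if_pos hsk]
        rw [ih acc d]
        simp only [Bool.and_eq_true, decide_eq_true_eq, beq_iff_eq] at hsk
        simp [hsk.1, hsk.2]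
      · rw [if_neg hsk]
        rw [ih (acc ++ [ln]) d]
        have hc : d % 2 = 0 ∨ ¬ PySem.Str.strip ln = "" := by
          rcases Nat.mod_two_eq_zero_or_one d with h1 | h1
          · exact Or.inl h1
          · right; intro h2; exact hsk (by simp [h1, h2])
        simp [List.filter_cons]
        rw [if_pos hc]
        simp

-- ===== VERDICT (by name: the statement is the Claim_ definition above) =====
theorem collapse_blank_lines_in_fences_spec : Claim_equal_collapse_blank_lines_in_fences := by
  intro text _
  unfold Spec_collapse_blank_lines_in_fences
  unfold collapse_blank_lines_in_fences collapse_blank_lines_in_fences_alt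
  simp only []
  have h := pv_main (PySem.Str.splitlines text) [] 0
  simp only [Nat.zero_mod] at h ⊢
  rw [show (decide (0 % 2 = 1)) = false by decide] at h
  rw [h]
  simp
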